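-- pv_equiv track=rewrite | github.com/mohamed-seyam/automatic_identification_of_swallowing_kinematics_gp | app/app/modules/dynamic_frame_classification.py | _get_dynamic_frames_indices
-- ===== SOURCE A (Python) =====
-- def _get_dynamic_frames_indices(arr):
--     dynamic_frames_begin_indices, dynamic_frames_end_indices = [], []
--
--     for idx in range(1, len(arr)):
--         prev = arr[idx-1]
--         curr = arr[idx]
--
--         if prev == 0 and curr == 1:
--             dynamic_frames_begin_indices.append(idx)
--
--         if prev == 1 and curr == 0 and len(dynamic_frames_begin_indices) != 0:
--             dynamic_frames_end_indices.append(idx)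
--
--     if len(dynamic_frames_begin_indices) != len(dynamic_frames_end_indices):
--         dynamic_frames_end_indices.append(len(arr)-1)
--
--     return dynamic_frames_begin_indices, dynamic_frames_end_indices
-- ===== SOURCE B (Python) =====
-- def _get_dynamic_frames_indices(arr):
--     # Run-length encode arr into (value, start_index) runs, then scan consecutive
--     # run pairs: a (0,1) boundary starts a dynamic segment, a (1,0) boundary after
--     # a start ends one; same length fixup as required.
--     runs, prev = [], None
--     for i, v in enumerate(arr):
--         if v != prev:
--             runs.append((v, i))
--             prev = v
--     begins, ends, started = [], [], False
--     for (pv, _), (cv, ci) in zip(runs, runs[1:]):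
--         if pv == 0 and cv == 1:
--             begins.append(ci)
--             started = True
--         elif pv == 1 and cv == 0 and started:
--             ends.append(ci)
--     if len(begins) != len(ends):
--         ends.append(len(arr) - 1)
--     return begins, ends
-- ===== Notes on version B (the rewrite author's own statement) =====
-- stated objective: alternative
-- what changed: A scans every adjacent element pair with a stateful loop; B first run-length encodes the array into (value, start) runs and then scans only consecutive run pairs with a started flag, so transition tests happen per run boundary instead of per element.
import Mathlib
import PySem

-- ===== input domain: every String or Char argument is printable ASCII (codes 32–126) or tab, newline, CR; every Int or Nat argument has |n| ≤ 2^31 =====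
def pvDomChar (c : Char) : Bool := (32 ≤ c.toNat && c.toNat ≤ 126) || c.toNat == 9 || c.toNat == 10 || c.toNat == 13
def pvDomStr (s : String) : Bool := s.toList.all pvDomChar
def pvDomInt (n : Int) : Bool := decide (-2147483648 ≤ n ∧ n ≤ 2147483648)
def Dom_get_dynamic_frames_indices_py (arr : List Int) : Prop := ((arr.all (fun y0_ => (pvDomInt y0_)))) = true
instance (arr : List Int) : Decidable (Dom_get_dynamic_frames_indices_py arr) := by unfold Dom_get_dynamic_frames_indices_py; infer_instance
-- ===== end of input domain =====

-- B replaces A's per-element transition loop by a run-length encoding of the array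
-- followed by a scan over consecutive run pairs; alternative decomposition, same cost.

-- ===== PORT A =====
def get_dynamic_frames_indices_py (arr : List Int) : List Int × List Int :=
  let st := (PySem.List.pyRange 1 (arr.length : Int) 1).foldl
    (fun (st : List Int × List Int) idx =>
      let prev := PySem.List.pyGetD arr (idx - 1) 0
      let curr := PySem.List.pyGetD arr idx 0
      let begins := if prev == 0 && curr == 1 then st.1 ++ [idx] else st.1
      let ends := if prev == 1 && curr == 0 && begins.length != 0 then st.2 ++ [idx] else st.2
      (begins, ends)) (([], []) : List Int × List Int)
  if st.1.length != st.2.length then (st.1, st.2 ++ [(arr.length : Int) - 1]) else st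

-- ===== PORT B =====
-- runs[1:] is ported as runs.drop 1 (exact: PySem.List.slice_from_one / drop for nonneg index)
def get_dynamic_frames_indices_py_alt (arr : List Int) : List Int × List Int :=
  let rp := (PySem.List.enumerate arr).foldl
    (fun (rp : List (Int × Int) × Option Int) iv =>
      if (some iv.2) != rp.2 then (rp.1 ++ [(iv.2, iv.1)], some iv.2) else rp)
    (([], none) : List (Int × Int) × Option Int)
  let runs := rp.1
  let st := (runs.zip (runs.drop 1)).foldl
    (fun (st : List Int × List Int × Bool) pq =>
      let pv := pq.1.1
      let cv := pq.2.1
      let ci := pq.2.2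
      if pv == 0 && cv == 1 then (st.1 ++ [ci], st.2.1, true)
      else if pv == 1 && cv == 0 && st.2.2 then (st.1, st.2.1 ++ [ci], st.2.2)
      else st)
    (([], [], false) : List Int × List Int × Bool)
  if st.1.length != st.2.1.length then (st.1, st.2.1 ++ [(arr.length : Int) - 1])
  else (st.1, st.2.1)

-- ===== PRECONDITION & SPEC =====
def Spec_get_dynamic_frames_indices_py (arr : List Int) (out : List Int × List Int) : Prop := out = get_dynamic_frames_indices_py_alt arr
instance (arr : List Int) (out : List Int × List Int) : Decidable (Spec_get_dynamic_frames_indices_py arr out) := by unfold Spec_get_dynamic_frames_indices_py; infer_instance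

-- ===== CLAIM (what is proved, stated in full; the proofs are below) =====
def Claim_equal_get_dynamic_frames_indices_py : Prop := ∀ (arr : List Int), Dom_get_dynamic_frames_indices_py arr → Spec_get_dynamic_frames_indices_py arr (get_dynamic_frames_indices_py arr)

-- ===== LEMMAS AND PROOFS =====

-- common reference recursion: walk the tail with the previous element and next index
def pvS (p : Int) (i : Int) (l : List Int) (b e : List Int) : List Int × List Int :=
  match l with
  | [] => (b, e)
  | c :: t =>
    let b' := if p == 0 && c == 1 then b ++ [i] else b
    let e' := if p == 1 && c == 0 && b'.length != 0 then e ++ [i] else e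
    pvS c (i + 1) t b' e'

-- recursive form of B's run-length encoding (prev as Option, start index i)
def pvRuns (p : Option Int) (i : Int) : List Int → List (Int × Int)
  | [] => []
  | v :: t => if (some v) ≠ p then (v, i) :: pvRuns (some v) (i + 1) t else pvRuns p (i + 1) t

-- recursive form of B's pair scan (prev run value v); carries the started flag
def pvBF (v : Int) (rs : List (Int × Int)) (st : Bool) (b e : List Int) :
    List Int × List Int × Bool :=
  match rs with
  | [] => (b, e, st)
  | (c, j) :: t =>
    if v == 0 && c == 1 then pvBF c t true (b ++ [j]) e
    else if v == 1 && c == 0 && st then pvBF c t st b (e ++ [j])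
    else pvBF c t st b e

def pvDrop (x : List Int × List Int × Bool) : List Int × List Int := (x.1, x.2.1)

theorem pvA_fold (arr : List Int) :
    ∀ (t : List Int) (k : Nat) (p : Int) (b e : List Int), arr.drop k = p :: t →
      (PySem.List.pyRange ((k : Int) + 1) (arr.length : Int) 1).foldl
        (fun (st : List Int × List Int) idx =>
          let prev := PySem.List.pyGetD arr (idx - 1) 0
          let curr := PySem.List.pyGetD arr idx 0
          let begins := if prev == 0 && curr == 1 then st.1 ++ [idx] else st.1
          let ends := if prev == 1 && curr == 0 && begins.length != 0 then st.2 ++ [idx] else st.2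
          (begins, ends)) (b, e)
      = pvS p ((k : Int) + 1) t b e := by
  intro t
  induction t with
  | nil =>
    intro k p b e hd
    have hlen : arr.length = k + 1 := by
      have := congrArg List.length hd
      simp at this; omega
    rw [PySem.List.pyRange_one_eq_nil (by omega : (arr.length : Int) ≤ (k : Int) + 1)]
    simp [pvS]
  | cons c t ih =>
    intro k p b e hd
    have hklt : k < arr.length := by
      have := congrArg List.length hd; simp at this; omega
    have hk1 : k + 1 < arr.length := by
      have := congrArg List.length hd; simp at this; omega
    have hp : arr[k] = p := by
      have := congrArg (·.head?) hd
      simpa [List.head?_drop, List.getElem?_eq_getElem hklt] using this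
    have hc : arr[k+1] = c := by
      have hd' : arr.drop (k+1) = c :: t := by
        have := congrArg List.tail hd
        simpa [List.tail_drop] using this
      have := congrArg (·.head?) hd'
      simpa [List.head?_drop, List.getElem?_eq_getElem hk1] using this
    rw [PySem.List.pyRange_one_cons (by omega : (k : Int) + 1 < (arr.length : Int))]
    rw [List.foldl_cons]
    have hprev : PySem.List.pyGetD arr ((k : Int) + 1 - 1) 0 = p := by
      have : ((k : Int) + 1 - 1) = ((k : Nat) : Int) := by omega
      rw [this, PySem.List.pyGetD_natCast]
      simp [List.getD, List.getElem?_eq_getElem hklt, hp]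
    have hcurr : PySem.List.pyGetD arr ((k : Int) + 1) 0 = c := by
      have : ((k : Int) + 1) = (((k + 1 : Nat)) : Int) := by omega
      rw [this, PySem.List.pyGetD_natCast]
      simp [List.getD, List.getElem?_eq_getElem hk1, hc]
    simp only [hprev, hcurr]
    have hd' : arr.drop (k+1) = c :: t := by
      have := congrArg List.tail hd
      simpa [List.tail_drop] using this
    have := ih (k+1) c
      (if p == 0 && c == 1 then b ++ [(k : Int) + 1] else b)
      (if p == 1 && c == 0 && (if p == 0 && c == 1 then b ++ [(k : Int) + 1] else b).length != 0
         then e ++ [(k : Int) + 1] else e) hd'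
    simp only [Nat.cast_add, Nat.cast_one] at this
    rw [this]
    simp [pvS]

-- B's first fold (append accumulator) equals the recursive pvRuns
theorem pvRuns_fold :
    ∀ (l : List Int) (i : Int) (rs : List (Int × Int)) (p : Option Int),
      (PySem.List.enumerate l i).foldl
        (fun (rp : List (Int × Int) × Option Int) iv =>
          if (some iv.2) != rp.2 then (rp.1 ++ [(iv.2, iv.1)], some iv.2) else rp) (rs, p)
      = (rs ++ pvRuns p i l, (l.foldl (fun _a v => some v) p)) := by
  intro l
  induction l with
  | nil => intro i rs p; simp [pvRuns, PySem.List.enumerate_nil]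
  | cons v t ih =>
    intro i rs p
    rw [PySem.List.enumerate_cons, List.foldl_cons]
    show List.foldl _ (if (some v) != p then (rs ++ [(v, i)], some v) else (rs, p))
        (PySem.List.enumerate t (i + 1)) = _
    by_cases h : (some v) = p
    · rw [if_neg (by simp [h] : ¬ ((some v) != p) = true)]
      rw [ih]
      have : t.foldl (fun _a v => some v) p = t.foldl (fun _a v => some v) (some v) := by
        cases t with
        | nil => simp [h]
        | cons x xs => simp
      simp [pvRuns, h, this]
    · rw [if_pos (by simpa using h : ((some v) != p) = true)]
      rw [ih]
      simp [pvRuns, h]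

-- B's second fold over zipped run pairs equals the recursive pvBF
theorem pvBF_fold :
    ∀ (rs : List (Int × Int)) (v i : Int) (st : Bool) (b e : List Int),
      ((((v, i) :: rs).zip rs).foldl
        (fun (st : List Int × List Int × Bool) pq =>
          let pv := pq.1.1
          let cv := pq.2.1
          let ci := pq.2.2
          if pv == 0 && cv == 1 then (st.1 ++ [ci], st.2.1, true)
          else if pv == 1 && cv == 0 && st.2.2 then (st.1, st.2.1 ++ [ci], st.2.2)
          else st) (b, e, st))
      = pvBF v rs st b e := by
  intro rs
  induction rs with
  | nil => intro v i st b e; simp [pvBF]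
  | cons q t ih =>
    intro v i st b e
    obtain ⟨c, j⟩ := q
    simp only [List.zip_cons_cons, List.foldl_cons]
    show List.foldl _ (if v == 0 && c == 1 then (b ++ [j], e, true)
           else if v == 1 && c == 0 && st then (b, e ++ [j], st) else (b, e, st))
        (((c, j) :: t).zip t) = _
    by_cases hr : (v == 0 && c == 1) = true
    · rw [if_pos hr]
      simp only [pvBF, if_pos hr]
      exact ih c j true (b ++ [j]) e
    · rw [if_neg hr]
      by_cases hf : (v == 1 && c == 0 && st) = true
      · rw [if_pos hf]
        simp only [pvBF]
        rw [if_neg hr, if_pos hf]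
        exact ih c j st b (e ++ [j])
      · rw [if_neg hf]
        simp only [pvBF]
        rw [if_neg hr, if_neg hf]
        exact ih c j st b e

-- the bridge: pvBF over the runs of l equals pvS over l itself
theorem pvBridge :
    ∀ (l : List Int) (v i : Int) (b e : List Int),
      pvDrop (pvBF v (pvRuns (some v) i l) (decide (b ≠ [])) b e) = pvS v i l b e := by
  intro l
  induction l with
  | nil => intro v i b e; simp [pvRuns, pvBF, pvS, pvDrop]
  | cons c t ih =>
    intro v i b e
    by_cases h : c = v
    · subst h
      simp only [pvRuns, if_neg (by simp : ¬ ((some c) ≠ (some c)))]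
      have hb : (c == 0 && c == 1) = false := by
        by_cases h0 : c = 0 <;> simp [h0]
      have he : (c == 1 && c == 0) = false := by
        by_cases h1 : c = 1 <;> simp [h1]
      simp only [pvS, hb, he]
      simp only [Bool.false_eq_true, if_false, Bool.false_and]
      exact ih c (i + 1) b e
    · have hne : (some c) ≠ (some v) := by simp [h]
      simp only [pvRuns, if_pos hne, pvBF, pvS]
      by_cases hr : (v == 0 && c == 1) = true
      · have hf : (v == 1 && c == 0) = false := by
          simp at hr; simp [hr.1]
        rw [if_pos hr]
        have hflag : (true : Bool) = decide ((b ++ [i]) ≠ []) := by simp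
        rw [hflag, ih]
        simp [hr, hf]
      · rw [if_neg hr]
        simp only [Bool.not_eq_true] at hr
        by_cases hf : (v == 1 && c == 0) = true
        · by_cases hb : b = []
          · subst hb
            rw [if_neg (by simp)]
            rw [ih]
            simp [hr, hf]
          · rw [if_pos (by simp [hf, hb])]
            rw [ih]
            simp [hr, hf, hb]
        · simp only [Bool.not_eq_true] at hf
          rw [if_neg (by simp [hf])]
          rw [ih]
          simp [hr, hf]

-- ===== VERDICT (by name: the statement is the Claim_ definition above) =====
theorem get_dynamic_frames_indices_py_spec : Claim_equal_get_dynamic_frames_indices_py := by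
  intro arr _
  unfold Spec_get_dynamic_frames_indices_py
  cases arr with
  | nil => decide
  | cons a0 t =>
    have hA := pvA_fold (a0 :: t) t 0 a0 [] [] (by simp)
    simp only [Nat.cast_zero, zero_add] at hA
    have hruns : pvRuns none 0 (a0 :: t) = (a0, 0) :: pvRuns (some a0) 1 t := by
      simp [pvRuns]
    have h1 : (pvBF a0 (pvRuns (some a0) 1 t) false [] []).1 = (pvS a0 1 t [] []).1 :=
      congrArg Prod.fst (pvBridge t a0 1 [] [])
    have h2 : (pvBF a0 (pvRuns (some a0) 1 t) false [] []).2.1 = (pvS a0 1 t [] []).2 :=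
      congrArg (fun x => x.2) (pvBridge t a0 1 [] [])
    simp only [get_dynamic_frames_indices_py, get_dynamic_frames_indices_py_alt, hA,
      pvRuns_fold (a0 :: t) 0 [] none, List.nil_append, hruns, List.drop_succ_cons,
      List.drop_zero, pvBF_fold, h1, h2]
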